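-- pv_equiv track=rewrite | github.com/MD-Woron/2048_on_pygame_for_pc | actions/compress.py | compress_up
-- ===== SOURCE A (Python) =====
-- def compress_up(matrix_field):
--     for j in range(len(matrix_field)):
--         i = 0  # индекс текущей строки
--         s = 0  # индекс первого числа, не являющегося 0
--         while i < len(matrix_field) - s:  # пока индекс строки меньше длинны строки ( работает только в случае если матрица квадратная ) минус индекса первого числа, не явл. 0
--             # другими словами: нас интересуют только числа, являющиеся нулями в строке, их переносим в конец
--             if matrix_field[i][j] == 0:  # итак, проверяем, что число являкется нулём
--                 k = i  # заносим индекс строки в отдельную переменную, чтобы ещё можно было изменять в цикле while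
--                 s += 1  # переносим наш "указатель" на следующее число, так как предыдущее явл. 0 и нас не интересует
--                 while k < (len(matrix_field) - 1):  # тут можно было использовать for k in range(k, len(l)-1), но ладно
--                     matrix_field[k][j] = matrix_field[k + 1][j]  # теперь вместо нолика в строке стоит элемент следующей строки на j'том месте
--                     # другими словами: 0 0 0 >> 1 0 0
--                     #                  0 0 0 >> 0 0 0
--                     #                  1 0 0 >> 1 0 0
--                     k += 1  # тупо переборный элемент, ничерта интересного!!!!!
--                 matrix_field[len(matrix_field) - 1][
--                     j] = 0  # последний элемент ( можно было юзать -1, но замес об этом не знал ) теперь становится 0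
--             # другими словами: 1 0 0 >> без изм.
--             #                  0 0 0 >> без изм.
--             #                  1 0 0 >> 0 0 0
--             else:  # иначе переходим на следующую строку
--                 i += 1
--
--     return matrix_field
-- ===== SOURCE B (Python) =====
-- def compress_up(matrix_field):
--     n = len(matrix_field)
--     for j in range(n):
--         col = [matrix_field[i][j] for i in range(n) if matrix_field[i][j] != 0]
--         col += [0] * (n - len(col))
--         for i in range(n):
--             matrix_field[i][j] = col[i]
--     return matrix_field
-- ===== Notes on version B (the rewrite author's own statement) =====
-- stated objective: simpler
-- what changed: Per column B collects the non-zero entries in one pass and pads zeros at the bottom, instead of A's re-shifting of the whole remaining column for every zero it meets.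
import Mathlib
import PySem

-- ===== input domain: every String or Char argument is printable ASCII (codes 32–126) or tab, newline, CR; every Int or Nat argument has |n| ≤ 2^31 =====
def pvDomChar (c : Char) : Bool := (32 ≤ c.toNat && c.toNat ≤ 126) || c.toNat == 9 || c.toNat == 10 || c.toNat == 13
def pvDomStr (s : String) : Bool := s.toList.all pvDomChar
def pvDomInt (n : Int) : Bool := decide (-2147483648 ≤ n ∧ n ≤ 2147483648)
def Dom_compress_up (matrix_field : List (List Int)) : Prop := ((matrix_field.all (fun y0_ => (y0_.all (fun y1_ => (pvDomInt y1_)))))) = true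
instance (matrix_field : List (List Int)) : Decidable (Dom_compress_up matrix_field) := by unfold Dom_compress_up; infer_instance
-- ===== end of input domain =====

-- B compresses each column in one pass (collect non-zeros, pad zeros) instead of A's
-- repeated whole-column shifting per zero; both Pythons mutate the argument in place the
-- same way, the equivalence proved here is about the return value.

-- ===== PORT A =====
-- matrix_field[i][j] (in range on Pre_)
def pvGet (m : List (List Int)) (i j : Nat) : Int := (m.getD i []).getD j 0
-- matrix_field[i][j] = v
def pvSet (m : List (List Int)) (i j : Nat) (v : Int) : List (List Int) :=
  m.set i ((m.getD i []).set j v)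

-- inner `while k < len(matrix_field) - 1` loop (fuel n suffices: n-1-k iterations)
def shiftGo : Nat → List (List Int) → Nat → Nat → Nat → List (List Int)
  | 0, m, _, _, _ => m
  | fuel+1, m, k, j, n =>
    if k < n - 1 then shiftGo fuel (pvSet m k j (pvGet m (k+1) j)) (k+1) j n else m

-- outer `while i < len(matrix_field) - s` loop (fuel n suffices: i+s grows each pass)
def outerGo : Nat → List (List Int) → Nat → Nat → Nat → Nat → List (List Int)
  | 0, m, _, _, _, _ => m
  | fuel+1, m, i, s, j, n =>
    if i < n - s then
      if pvGet m i j = 0 then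
        outerGo fuel (pvSet (shiftGo n m i j n) (n - 1) j 0) i (s+1) j n
      else outerGo fuel m (i+1) s j n
    else m

def compress_up (matrix_field : List (List Int)) : List (List Int) :=
  let n := matrix_field.length
  (List.range n).foldl (fun acc j => outerGo n acc 0 0 j n) matrix_field

-- ===== PORT B =====
def compress_up_alt (matrix_field : List (List Int)) : List (List Int) :=
  let n := matrix_field.length
  (List.range n).foldl (fun acc j =>
    let nz := ((List.range n).map (fun i => pvGet acc i j)).filter (fun v => v ≠ 0)
    let col := nz ++ List.replicate (n - nz.length) 0
    (List.range n).foldl (fun a i => pvSet a i j (col.getD i 0)) acc) matrix_field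

-- ===== PRECONDITION & SPEC =====
-- A indexes every row at every column below len(matrix_field): it raises IndexError
-- exactly when some row is shorter than the number of rows; Pre_ excludes exactly those.
def Pre_compress_up (matrix_field : List (List Int)) : Prop :=
  ∀ row ∈ matrix_field, matrix_field.length ≤ row.length
instance (matrix_field : List (List Int)) : Decidable (Pre_compress_up matrix_field) := by
  unfold Pre_compress_up; infer_instance

def pvWitness_compress_up : List (List Int) := [[0, 2], [2, 0]]

def Spec_compress_up (matrix_field : List (List Int)) (out : List (List Int)) : Prop := out = compress_up_alt matrix_field
instance (matrix_field : List (List Int)) (out : List (List Int)) : Decidable (Spec_compress_up matrix_field out) := by unfold Spec_compress_up; infer_instance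

-- ===== CLAIM (what is proved, stated in full; the proofs are below) =====
def Claim_equal_compress_up : Prop := ∀ (matrix_field : List (List Int)), Dom_compress_up matrix_field → Pre_compress_up matrix_field → Spec_compress_up matrix_field (compress_up matrix_field)

-- ===== LEMMAS AND PROOFS =====

-- the j-th column of the matrix, as a list (getD 0 outside: harmless on Pre_)
def colGet (m : List (List Int)) (j : Nat) : List Int := m.map (fun r => r.getD j 0)

-- rows all long enough to hold column j
def RowsOK (m : List (List Int)) (j : Nat) : Prop := ∀ r ∈ m, j < r.length

-- pure column-level versions of A's two loops
def shiftL : Nat → List Int → Nat → Nat → List Int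
  | 0, c, _, _ => c
  | f+1, c, k, n => if k < n - 1 then shiftL f (c.set k (c.getD (k+1) 0)) (k+1) n else c

def outerL : Nat → List Int → Nat → Nat → Nat → List Int
  | 0, c, _, _, _ => c
  | f+1, c, i, s, n =>
    if i < n - s then
      if c.getD i 0 = 0 then outerL f ((shiftL n c i n).set (n-1) 0) i (s+1) n
      else outerL f c (i+1) s n
    else c

theorem pvGet_eq_colGet (m : List (List Int)) (i j : Nat) :
    pvGet m i j = (colGet m j).getD i 0 := by
  induction m generalizing i with
  | nil => simp [pvGet, colGet]
  | cons r t ih =>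
    cases i with
    | zero => simp [pvGet, colGet]
    | succ i => simpa [pvGet, colGet] using ih i

theorem rowLens_pvSet (m : List (List Int)) (i j : Nat) (v : Int) :
    (pvSet m i j v).map List.length = m.map List.length := by
  induction m generalizing i with
  | nil => simp [pvSet]
  | cons r t ih =>
    cases i with
    | zero => simp [pvSet]
    | succ i => simpa [pvSet, List.set_cons_succ] using ih i

theorem rowPred_of_rowLens {m₁ m₂ : List (List Int)} {p : Nat → Prop}
    (h : m₁.map List.length = m₂.map List.length) (h₂ : ∀ r ∈ m₂, p r.length) :
    ∀ r ∈ m₁, p r.length := by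
  intro r hr
  have : r.length ∈ m₂.map List.length := h ▸ List.mem_map_of_mem hr
  obtain ⟨r', hr', he⟩ := List.mem_map.1 this
  exact he ▸ h₂ r' hr'

theorem rowsOK_of_rowLens {m₁ m₂ : List (List Int)} {j : Nat}
    (h : m₁.map List.length = m₂.map List.length) (h₂ : RowsOK m₂ j) : RowsOK m₁ j :=
  rowPred_of_rowLens h h₂

theorem colGet_pvSet_self {m : List (List Int)} {j : Nat} (h : RowsOK m j) (i : Nat) (v : Int) :
    colGet (pvSet m i j v) j = (colGet m j).set i v := by
  induction m generalizing i with
  | nil => simp [pvSet, colGet]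
  | cons r t ih =>
    cases i with
    | zero =>
      have hj : j < r.length := h r (List.mem_cons_self ..)
      simp [pvSet, colGet, List.getD_eq_getElem?_getD, hj]
    | succ i =>
      have ht : RowsOK t j := fun r' hr' => h r' (List.mem_cons_of_mem _ hr')
      simpa [pvSet, colGet] using ih ht i

theorem colGet_pvSet_ne (m : List (List Int)) {j j' : Nat} (hne : j' ≠ j) (i : Nat) (v : Int) :
    colGet (pvSet m i j v) j' = colGet m j' := by
  induction m generalizing i with
  | nil => simp [pvSet, colGet]
  | cons r t ih =>
    cases i with
    | zero =>
      simp [pvSet, colGet, List.getD_eq_getElem?_getD, List.getElem?_set_ne (Ne.symm hne)]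
    | succ i => simpa [pvSet, colGet] using ih i

-- shiftGo simulated by shiftL on column j
theorem shiftGo_sim (f : Nat) (m : List (List Int)) (k j n : Nat) (h : RowsOK m j) :
    colGet (shiftGo f m k j n) j = shiftL f (colGet m j) k n ∧
    (∀ j', j' ≠ j → colGet (shiftGo f m k j n) j' = colGet m j') ∧
    (shiftGo f m k j n).map List.length = m.map List.length := by
  induction f generalizing m k with
  | zero => simp [shiftGo, shiftL]
  | succ f ih =>
    by_cases hk : k < n - 1
    · have hrl := rowLens_pvSet m k j (pvGet m (k+1) j)
      have h' : RowsOK (pvSet m k j (pvGet m (k+1) j)) j := rowsOK_of_rowLens hrl h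
      obtain ⟨h1, h2, h3⟩ := ih (pvSet m k j (pvGet m (k+1) j)) (k+1) h'
      refine ⟨?_, ?_, ?_⟩
      · simp only [shiftGo, shiftL, hk, if_pos]
        rw [h1, colGet_pvSet_self h, pvGet_eq_colGet]
      · intro j' hj'
        simp only [shiftGo, hk, if_pos]
        rw [h2 j' hj', colGet_pvSet_ne _ hj']
      · simp only [shiftGo, hk, if_pos]
        rw [h3, hrl]
    · simp [shiftGo, shiftL, hk]

-- outerGo simulated by outerL on column j
theorem outerGo_sim (f : Nat) (m : List (List Int)) (i s j n : Nat) (h : RowsOK m j) :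
    colGet (outerGo f m i s j n) j = outerL f (colGet m j) i s n ∧
    (∀ j', j' ≠ j → colGet (outerGo f m i s j n) j' = colGet m j') ∧
    (outerGo f m i s j n).map List.length = m.map List.length := by
  induction f generalizing m i s with
  | zero => simp [outerGo, outerL]
  | succ f ih =>
    by_cases hi : i < n - s
    · by_cases hz : pvGet m i j = 0
      · obtain ⟨s1, s2, s3⟩ := shiftGo_sim n m i j n h
        have hS : RowsOK (shiftGo n m i j n) j := rowsOK_of_rowLens s3 h
        set m' := pvSet (shiftGo n m i j n) (n-1) j 0 with hm'
        have hrl : m'.map List.length = m.map List.length := by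
          rw [hm', rowLens_pvSet, s3]
        have h' : RowsOK m' j := rowsOK_of_rowLens hrl h
        obtain ⟨h1, h2, h3⟩ := ih m' i (s+1) h'
        have hcol : colGet m' j = (shiftL n (colGet m j) i n).set (n-1) 0 := by
          rw [hm', colGet_pvSet_self hS, s1]
        have hz' : (colGet m j).getD i 0 = 0 := by rw [← pvGet_eq_colGet]; exact hz
        refine ⟨?_, ?_, ?_⟩
        · simp only [outerGo, outerL, hi, if_pos, hz, hz', if_pos]
          rw [h1, hcol]
        · intro j' hj'
          simp only [outerGo, hi, if_pos, hz, if_pos]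
          rw [h2 j' hj', hm', colGet_pvSet_ne _ hj', s2 j' hj']
        · simp only [outerGo, hi, if_pos, hz, if_pos]
          rw [h3, hrl]
      · have hz' : ¬ (colGet m j).getD i 0 = 0 := by rw [← pvGet_eq_colGet]; exact hz
        obtain ⟨h1, h2, h3⟩ := ih m (i+1) s h
        refine ⟨?_, ?_, ?_⟩
        · simp only [outerGo, outerL, hi, if_pos, hz, hz']
          exact h1
        · intro j' hj'
          simpa only [outerGo, hi, if_pos, hz, if_neg] using h2 j' hj'
        · simpa only [outerGo, hi, if_pos, hz, if_neg] using h3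
    · simp [outerGo, outerL, hi]

-- the shift loop, closed form: drop element i, keep the last element in place
theorem shiftL_term (n : Nat) (xs : List Int) (k : Nat)
    (hc : xs.length = n) (hk : k < n) (hk' : ¬ k < n - 1) :
    xs = xs.take k ++ xs.drop (k+1) ++ [xs.getD (n-1) 0] := by
  have he : k = n - 1 := by omega
  subst he
  have hlt : n - 1 < xs.length := by omega
  have h1 : xs.drop (n-1+1) = [] := List.drop_eq_nil_of_le (by omega)
  rw [List.getD_eq_getElem _ _ hlt, h1, List.append_nil]
  conv_lhs => rw [← List.take_append_drop (n-1) xs]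
  rw [List.drop_eq_getElem_cons hlt, h1]

theorem shiftL_spec (n : Nat) (f : Nat) (xs : List Int) (k : Nat)
    (hc : xs.length = n) (hk : k < n) (hf : n - 1 - k ≤ f) :
    shiftL f xs k n = xs.take k ++ xs.drop (k+1) ++ [xs.getD (n-1) 0] := by
  induction f generalizing xs k with
  | zero =>
    rw [shiftL]
    exact shiftL_term n xs k hc hk (by omega)
  | succ f ih =>
    by_cases hk' : k < n - 1
    · rw [shiftL, if_pos hk']
      set xs' := xs.set k (xs.getD (k+1) 0) with hc'
      have hlen : xs'.length = n := by simp [hc', hc]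
      rw [ih xs' (k+1) hlen (by omega) (by omega)]
      have e1 : xs'.getD (n-1) 0 = xs.getD (n-1) 0 := by
        simp [hc', List.getD_eq_getElem?_getD, List.getElem?_set_ne (show k ≠ n-1 by omega)]
      have e2 : xs'.drop (k+2) = xs.drop (k+2) := by
        rw [hc', List.drop_set_of_lt (by omega)]
      have e3 : xs'.take (k+1) = xs.take k ++ [xs.getD (k+1) 0] := by
        rw [hc', List.take_set, List.take_succ_eq_append_getElem (l := xs) (by omega),
          List.set_append_right _ _ (by simp)]
        simp [Nat.min_eq_left (show k ≤ xs.length by omega)]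
      have e4 : xs.drop (k+1) = xs.getD (k+1) 0 :: xs.drop (k+2) := by
        rw [List.getD_eq_getElem _ _ (by omega)]
        exact List.drop_eq_getElem_cons (by omega)
      rw [e1, e2, e3, e4]
      simp
    · rw [shiftL, if_neg hk']
      exact shiftL_term n xs k hc hk hk'

theorem outerL_term (n : Nat) (xs : List Int) (i s : Nat)
    (hc : xs.length = n) (his : i + s ≤ n) (hi : ¬ i < n - s)
    (hz : xs.drop (n - s) = List.replicate s 0) :
    xs = xs.take i ++ ((xs.drop i).take (n - s - i)).filter (fun v => decide (v ≠ 0)) ++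
        List.replicate (n - i - (((xs.drop i).take (n - s - i)).filter (fun v => decide (v ≠ 0))).length) 0 := by
  have hi' : i = n - s := by omega
  have hns : n - s - i = 0 := by omega
  rw [hns]
  simp only [List.take_zero, List.filter_nil, List.length_nil, Nat.sub_zero, List.nil_append]
  have hrep : n - i = s := by omega
  rw [hrep]
  conv_lhs => rw [← List.take_append_drop i xs]
  rw [hi', hz]
  simp

theorem outerL_spec (n : Nat) (f : Nat) (xs : List Int) (i s : Nat)
    (hc : xs.length = n) (his : i + s ≤ n)
    (hz : xs.drop (n - s) = List.replicate s 0) (hf : n - i - s ≤ f) :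
    outerL f xs i s n =
      xs.take i ++ ((xs.drop i).take (n - s - i)).filter (fun v => decide (v ≠ 0)) ++
        List.replicate (n - i - (((xs.drop i).take (n - s - i)).filter (fun v => decide (v ≠ 0))).length) 0 := by
  induction f generalizing xs i s with
  | zero =>
    rw [outerL]
    exact outerL_term n xs i s hc his (by omega) hz
  | succ f ih =>
    by_cases hi : i < n - s
    · have hilt : i < xs.length := by omega
      by_cases hv : xs.getD i 0 = 0
      · -- zero at row i: shift the column up, recurse with s+1
        rw [outerL, if_pos hi, if_pos hv]
        have hvz : xs[i]'hilt = 0 := by rwa [List.getD_eq_getElem _ _ hilt] at hv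
        have hshift : (shiftL n xs i n).set (n-1) 0 = (xs.take i ++ xs.drop (i+1)) ++ [0] := by
          rw [shiftL_spec n n xs i hc (by omega) (by omega)]
          have hlen : (xs.take i ++ xs.drop (i+1)).length = n - 1 := by simp <;> omega
          rw [List.set_append_right _ _ (le_of_eq hlen), hlen, Nat.sub_self,
            List.set_cons_zero]
        rw [hshift]
        have hlen2 : ((xs.take i ++ xs.drop (i+1)) ++ [0] : List Int).length = n := by
          simp <;> omega
        have edropi : ((xs.take i ++ xs.drop (i+1)) ++ [0] : List Int).drop i = xs.drop (i+1) ++ [0] := by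
          rw [List.drop_append, List.drop_append,
            List.drop_eq_nil_of_le (by simp <;> omega)]
          have h1 : i - (xs.take i).length = 0 := by simp <;> omega
          have h2 : i - (xs.take i ++ xs.drop (i+1)).length = 0 := by simp <;> omega
          rw [h1, h2]
          simp
        have hz₂ : ((xs.take i ++ xs.drop (i+1)) ++ [0] : List Int).drop (n - (s+1)) = List.replicate (s+1) 0 := by
          rw [List.drop_append, List.drop_append,
            List.drop_eq_nil_of_le (by simp <;> omega)]
          have h2 : n - (s+1) - (xs.take i ++ xs.drop (i+1)).length = 0 := by simp <;> omega
          have h3 : n - (s+1) - (xs.take i).length = n - s - (i+1) := by simp <;> omega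
          rw [h2, h3]
          have h4 : (xs.drop (i+1)).drop (n - s - (i+1)) = xs.drop (n - s) := by
            rw [List.drop_drop]
            congr 1 <;> omega
          rw [h4, hz, List.nil_append, List.drop_zero, ← List.replicate_succ']
        rw [ih _ i (s+1) hlen2 (by omega) hz₂ (by omega)]
        have etake : ((xs.take i ++ xs.drop (i+1)) ++ [0] : List Int).take i = xs.take i := by
          rw [List.take_append_of_le_length (by simp <;> omega),
            List.take_append_of_le_length (by simp <;> omega), List.take_take]
          simp
        have emid₂ : (((xs.take i ++ xs.drop (i+1)) ++ [0] : List Int).drop i).take (n - (s+1) - i)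
            = (xs.drop (i+1)).take (n - s - 1 - i) := by
          rw [edropi, List.take_append_of_le_length (by simp <;> omega)]
          congr 1 <;> omega
        have emid : (xs.drop i).take (n - s - i) = xs[i]'hilt :: (xs.drop (i+1)).take (n - s - 1 - i) := by
          rw [List.drop_eq_getElem_cons hilt]
          have h5 : n - s - i = (n - s - 1 - i) + 1 := by omega
          rw [h5, List.take_succ_cons]
        rw [etake, emid₂, emid, List.filter_cons_of_neg (by simp [hvz])]
      · -- non-zero at row i: advance to the next row
        rw [outerL, if_pos hi, if_neg hv]
        rw [ih xs (i+1) s hc (by omega) hz (by omega)]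
        have hvz : ¬ xs[i]'hilt = 0 := by rwa [List.getD_eq_getElem _ _ hilt] at hv
        have emid : (xs.drop i).take (n - s - i) = xs[i] :: (xs.drop (i+1)).take (n - s - (i+1)) := by
          rw [List.drop_eq_getElem_cons hilt]
          have h5 : n - s - i = (n - s - (i+1)) + 1 := by omega
          rw [h5, List.take_succ_cons]
        rw [emid, List.filter_cons_of_pos (by simp [hvz]),
          List.take_succ_eq_append_getElem hilt]
        simp only [List.length_cons]
        have h6 : n - i - ((((xs.drop (i+1)).take (n - s - (i+1))).filter (fun v => decide (v ≠ 0))).length + 1)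
            = n - (i+1) - (((xs.drop (i+1)).take (n - s - (i+1))).filter (fun v => decide (v ≠ 0))).length := by
          omega
        rw [h6]
        simp only [List.append_assoc, List.singleton_append]
    · rw [outerL, if_neg hi]
      exact outerL_term n xs i s hc his hi hz

theorem outerL_closed (n : Nat) (c : List Int) (hc : c.length = n) :
    outerL n c 0 0 n =
      c.filter (fun v => decide (v ≠ 0)) ++
        List.replicate (n - (c.filter (fun v => decide (v ≠ 0))).length) 0 := by
  have := outerL_spec n n c 0 0 hc (by omega) (by simp [hc]) (by omega)
  simpa [hc, List.take_of_length_le (le_of_eq hc)] using this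

-- B's write loop
theorem writeFold_other (l : List Nat) (m : List (List Int)) (j : Nat) (col : List Int)
    {j' : Nat} (hj' : j' ≠ j) :
    colGet (l.foldl (fun a i => pvSet a i j (col.getD i 0)) m) j' = colGet m j' := by
  induction l generalizing m with
  | nil => rfl
  | cons x l ih => simp only [List.foldl_cons]; rw [ih, colGet_pvSet_ne _ hj']

theorem writeFold_rowLens (l : List Nat) (m : List (List Int)) (j : Nat) (col : List Int) :
    (l.foldl (fun a i => pvSet a i j (col.getD i 0)) m).map List.length = m.map List.length := by
  induction l generalizing m with
  | nil => rfl
  | cons x l ih => simp only [List.foldl_cons]; rw [ih, rowLens_pvSet]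

theorem writeFold_range (k : Nat) (m : List (List Int)) (j : Nat) (col : List Int)
    (h : RowsOK m j) (hk : k ≤ m.length) (hkc : k ≤ col.length) :
    colGet ((List.range k).foldl (fun a i => pvSet a i j (col.getD i 0)) m) j =
      col.take k ++ (colGet m j).drop k := by
  induction k with
  | zero => simp
  | succ k ih =>
    rw [List.range_succ, List.foldl_append, List.foldl_cons, List.foldl_nil]
    have hok : RowsOK ((List.range k).foldl (fun a i => pvSet a i j (col.getD i 0)) m) j :=
      rowsOK_of_rowLens (writeFold_rowLens ..) h
    rw [colGet_pvSet_self hok, ih (by omega) (by omega)]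
    have hklt : k < (colGet m j).length := by simp [colGet]; omega
    have hkcl : k < col.length := by omega
    have hlen : (col.take k).length = k := by simp; omega
    rw [List.set_append_right _ _ (le_of_eq hlen), hlen, Nat.sub_self,
      List.drop_eq_getElem_cons hklt, List.set_cons_zero,
      List.take_succ_eq_append_getElem hkcl, List.getD_eq_getElem _ _ hkcl,
      List.append_assoc, List.singleton_append]

theorem writeFold_self (n : Nat) (m : List (List Int)) (j : Nat) (col : List Int)
    (h : RowsOK m j) (hm : m.length = n) (hcol : col.length = n) :
    colGet ((List.range n).foldl (fun a i => pvSet a i j (col.getD i 0)) m) j = col := by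
  have := writeFold_range n m j col h (by omega) (by omega)
  rw [this]
  have hcl : (colGet m j).length = n := by simp [colGet, hm]
  rw [List.take_of_length_le (le_of_eq hcol), List.drop_eq_nil_of_le (le_of_eq hcl),
    List.append_nil]

-- matrices with the same row lengths and the same columns are equal
theorem row_ext {r₁ r₂ : List Int} (hl : r₁.length = r₂.length)
    (h : ∀ j, r₁.getD j 0 = r₂.getD j 0) : r₁ = r₂ := by
  apply List.ext_getElem hl
  intro i h1 h2
  have := h i
  rwa [List.getD_eq_getElem _ _ h1, List.getD_eq_getElem _ _ h2] at this

theorem mat_ext {m₁ m₂ : List (List Int)}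
    (hl : m₁.map List.length = m₂.map List.length)
    (hc : ∀ j, colGet m₁ j = colGet m₂ j) : m₁ = m₂ := by
  induction m₁ generalizing m₂ with
  | nil => cases m₂ with
    | nil => rfl
    | cons r t => simp at hl
  | cons r t ih =>
    cases m₂ with
    | nil => simp at hl
    | cons r₂ t₂ =>
      simp only [List.map_cons, List.cons.injEq] at hl
      have hcj : ∀ j, r.getD j 0 = r₂.getD j 0 ∧ colGet t j = colGet t₂ j := by
        intro j
        have := hc j
        simpa [colGet] using this
      rw [row_ext hl.1 (fun j => (hcj j).1), ih hl.2 (fun j => (hcj j).2)]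

-- Shape: n rows, each long enough
def Shape (m : List (List Int)) (n : Nat) : Prop :=
  m.length = n ∧ ∀ r ∈ m, n ≤ r.length

theorem step_eq (n : Nat) (acc : List (List Int)) (j : Nat) (hj : j < n) (h : Shape acc n) :
    outerGo n acc 0 0 j n =
      (List.range n).foldl
        (fun a i => pvSet a i j
          ((((List.range n).map (fun i => pvGet acc i j)).filter (fun v => v ≠ 0) ++
            List.replicate (n - (((List.range n).map (fun i => pvGet acc i j)).filter (fun v => v ≠ 0)).length) 0).getD i 0))
        acc := by
  have hOK : RowsOK acc j := fun r hr => lt_of_lt_of_le hj (h.2 r hr)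
  obtain ⟨a1, a2, a3⟩ := outerGo_sim n acc 0 0 j n hOK
  have hmap : (List.range n).map (fun i => pvGet acc i j) = colGet acc j := by
    apply List.ext_getElem
    · simp [colGet, h.1]
    · intro i h1 h2
      simp only [List.getElem_map, List.getElem_range]
      rw [pvGet_eq_colGet, List.getD_eq_getElem _ _ h2]
  rw [hmap]
  have hnzlen : ((colGet acc j).filter (fun v => decide (v ≠ 0))).length ≤ n := by
    have h1 := List.length_filter_le (fun v => decide (v ≠ 0)) (colGet acc j)
    have h2 : (colGet acc j).length = n := by simp [colGet, h.1]
    omega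
  have hcollen : ((colGet acc j).filter (fun v => decide (v ≠ 0)) ++
      List.replicate (n - ((colGet acc j).filter (fun v => decide (v ≠ 0))).length) 0).length = n := by
    rw [List.length_append, List.length_replicate]
    omega
  apply mat_ext
  · rw [a3, writeFold_rowLens]
  · intro j'
    by_cases hj' : j' = j
    · subst hj'
      rw [a1, writeFold_self n acc j' _ hOK h.1 hcollen,
        outerL_closed n (colGet acc j') (by simp [colGet, h.1])]
    · rw [a2 j' hj', writeFold_other _ _ _ _ hj']

theorem foldl_eq (n : Nat) (l : List Nat) (acc : List (List Int))
    (hl : ∀ j ∈ l, j < n) (h : Shape acc n) :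
    l.foldl (fun acc j => outerGo n acc 0 0 j n) acc =
      l.foldl (fun acc j =>
        let nz := ((List.range n).map (fun i => pvGet acc i j)).filter (fun v => v ≠ 0)
        let col := nz ++ List.replicate (n - nz.length) 0
        (List.range n).foldl (fun a i => pvSet a i j (col.getD i 0)) acc) acc := by
  induction l generalizing acc with
  | nil => rfl
  | cons j l ih =>
    simp only [List.foldl_cons]
    have hj : j < n := hl j (List.mem_cons_self ..)
    rw [step_eq n acc j hj h]
    have hrl := writeFold_rowLens (List.range n) acc j
      (((List.range n).map (fun i => pvGet acc i j)).filter (fun v => v ≠ 0) ++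
        List.replicate (n - (((List.range n).map (fun i => pvGet acc i j)).filter (fun v => v ≠ 0)).length) 0)
    have hlen : ((List.range n).foldl
        (fun a i => pvSet a i j
          ((((List.range n).map (fun i => pvGet acc i j)).filter (fun v => v ≠ 0) ++
            List.replicate (n - (((List.range n).map (fun i => pvGet acc i j)).filter (fun v => v ≠ 0)).length) 0).getD i 0))
        acc).length = n := by
      have h2 := congrArg List.length hrl
      rw [List.length_map, List.length_map] at h2
      rw [h2, h.1]
    exact ih _ (fun j' hj' => hl j' (List.mem_cons_of_mem _ hj'))
      ⟨hlen, rowPred_of_rowLens hrl h.2⟩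

-- ===== VERDICT (by name: the statement is the Claim_ definition above) =====
theorem compress_up_spec : Claim_equal_compress_up := by
  intro m _ hpre
  unfold Spec_compress_up compress_up compress_up_alt
  exact foldl_eq m.length (List.range m.length) m
    (fun j hj => List.mem_range.1 hj) ⟨rfl, hpre⟩
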